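-- pv_equiv track=rewrite | github.com/parvvaresh/hazm | hazm/translate.py | _clipped_count
-- ===== SOURCE A (Python) =====
-- def _clipped_count(refs_ngram, pred_ngram):
--     score = 0
--     for p_gram in pred_ngram:
--         pred_ngram_count = pred_ngram[p_gram]
--         max_gram_refs = 0
--         for ref_ngram in refs_ngram:
--             if p_gram in ref_ngram:
--                 max_gram_refs = max(max_gram_refs, ref_ngram[p_gram])
--         score += min(max_gram_refs, pred_ngram_count)
--     return score
-- ===== SOURCE B (Python) =====
-- def _clipped_count(refs_ngram, pred_ngram):
--     best = {}
--     for ref_ngram in refs_ngram: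
--         for gram, count in ref_ngram.items():
--             if count > best.get(gram, 0):
--                 best[gram] = count
--     return sum(min(best.get(gram, 0), count) for gram, count in pred_ngram.items())
-- ===== Notes on version B (the rewrite author's own statement) =====
-- stated objective: faster
-- what changed: B precomputes one merged dict of per-gram maximum counts over all references in a single pass, then scores each predicted gram with one O(1) lookup, instead of A's rescan of every reference dict for every predicted gram.
import Mathlib
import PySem

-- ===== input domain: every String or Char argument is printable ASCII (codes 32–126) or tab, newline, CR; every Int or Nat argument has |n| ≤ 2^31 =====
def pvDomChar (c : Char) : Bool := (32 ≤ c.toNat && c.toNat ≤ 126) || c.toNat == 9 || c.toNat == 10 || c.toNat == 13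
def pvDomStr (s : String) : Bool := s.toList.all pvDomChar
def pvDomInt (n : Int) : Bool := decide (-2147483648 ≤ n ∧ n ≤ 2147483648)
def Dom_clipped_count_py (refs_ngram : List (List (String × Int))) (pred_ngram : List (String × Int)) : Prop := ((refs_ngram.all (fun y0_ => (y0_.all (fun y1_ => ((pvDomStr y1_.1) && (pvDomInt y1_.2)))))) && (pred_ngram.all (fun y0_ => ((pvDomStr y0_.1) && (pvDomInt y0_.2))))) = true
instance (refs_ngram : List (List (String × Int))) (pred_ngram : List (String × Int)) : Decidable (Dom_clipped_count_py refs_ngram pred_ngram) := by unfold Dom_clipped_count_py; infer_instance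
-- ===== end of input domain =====

-- B replaces A's per-predicted-gram scan of every reference dict by one precomputed
-- merged max-count dict with O(1) lookups (objective: faster, asymptotic).

-- ===== PORT A =====
-- dicts are association lists; 'g in d' / 'd[g]' is first-match lookup (List.lookup)
def clipped_count_py (refs_ngram : List (List (String × Int))) (pred_ngram : List (String × Int)) : Int :=
  pred_ngram.foldl (fun score p_gram =>
    let pred_ngram_count := p_gram.2
    let max_gram_refs : Int :=
      refs_ngram.foldl (fun max_gram_refs ref_ngram =>
        match ref_ngram.lookup p_gram.1 with
        | some v => max max_gram_refs v
        | none => max_gram_refs) 0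
    score + min max_gram_refs pred_ngram_count) 0

-- ===== PORT B =====
-- merged per-gram maximum count over all references, one pass
def bestRefCounts (refs_ngram : List (List (String × Int))) : PySem.Dict String Int :=
  refs_ngram.foldl (fun best ref_ngram =>
    ref_ngram.foldl (fun best p =>
      if p.2 > best.getD p.1 0 then best.insert p.1 p.2 else best) best)
    PySem.Dict.empty

def clipped_count_py_alt (refs_ngram : List (List (String × Int))) (pred_ngram : List (String × Int)) : Int :=
  (pred_ngram.map (fun p => min ((bestRefCounts refs_ngram).getD p.1 0) p.2)).sum

-- ===== PRECONDITION & SPEC =====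
-- The Python arguments are dicts, so their association-list encodings have unique keys;
-- Pre_ excludes only duplicate-key lists, which no Python dict can produce.
def Pre_clipped_count_py (refs_ngram : List (List (String × Int))) (pred_ngram : List (String × Int)) : Prop :=
  (∀ ref ∈ refs_ngram, (ref.map Prod.fst).Nodup) ∧ (pred_ngram.map Prod.fst).Nodup

instance (refs_ngram : List (List (String × Int))) (pred_ngram : List (String × Int)) : Decidable (Pre_clipped_count_py refs_ngram pred_ngram) := by unfold Pre_clipped_count_py; infer_instance

def pvWitness_clipped_count_py : (List (List (String × Int))) × (List (String × Int)) :=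
  ([[("a", 2), ("b", 1)], [("a", 5)]], [("a", 3), ("c", 1)])

def Spec_clipped_count_py (refs_ngram : List (List (String × Int))) (pred_ngram : List (String × Int)) (out : Int) : Prop := out = clipped_count_py_alt refs_ngram pred_ngram
instance (refs_ngram : List (List (String × Int))) (pred_ngram : List (String × Int)) (out : Int) : Decidable (Spec_clipped_count_py refs_ngram pred_ngram out) := by unfold Spec_clipped_count_py; infer_instance

-- ===== CLAIM (what is proved, stated in full; the proofs are below) =====
def Claim_equal_clipped_count_py : Prop := ∀ (refs_ngram : List (List (String × Int))) (pred_ngram : List (String × Int)), Dom_clipped_count_py refs_ngram pred_ngram → Pre_clipped_count_py refs_ngram pred_ngram → Spec_clipped_count_py refs_ngram pred_ngram (clipped_count_py refs_ngram pred_ngram)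

-- ===== LEMMAS AND PROOFS =====

-- one step of B's inner loop, pointwise at key g
lemma getD_bStep (best : PySem.Dict String Int) (k : String) (c : Int) (g : String) :
    ((if c > best.getD k 0 then best.insert k c else best).getD g 0)
      = if g = k then max (best.getD k 0) c else best.getD g 0 := by
  by_cases h2 : g = k
  · rw [if_pos h2]
    by_cases h1 : c > best.getD k 0
    · rw [if_pos h1, PySem.Dict.getD_insert, if_pos h2]; omega
    · rw [if_neg h1, h2]; omega
  · rw [if_neg h2]
    by_cases h1 : c > best.getD k 0
    · rw [if_pos h1, PySem.Dict.getD_insert, if_neg h2]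
    · rw [if_neg h1]

-- B's inner loop leaves keys it never touches alone
lemma getD_innerFold_not_mem (ref : List (String × Int)) (best : PySem.Dict String Int)
    (g : String) (hg : g ∉ ref.map Prod.fst) :
    (ref.foldl (fun best p =>
      if p.2 > best.getD p.1 0 then best.insert p.1 p.2 else best) best).getD g 0
      = best.getD g 0 := by
  induction ref generalizing best with
  | nil => rfl
  | cons p rest ih =>
    simp only [List.map_cons, List.mem_cons, not_or] at hg
    simp only [List.foldl_cons]
    rw [ih _ hg.2, getD_bStep, if_neg hg.1]

-- B's inner loop over one reference, pointwise = A's first-match lookup + max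
lemma getD_innerFold (ref : List (String × Int)) (best : PySem.Dict String Int)
    (g : String) (hnd : (ref.map Prod.fst).Nodup) :
    (ref.foldl (fun best p =>
      if p.2 > best.getD p.1 0 then best.insert p.1 p.2 else best) best).getD g 0
      = (match ref.lookup g with
         | some v => max (best.getD g 0) v
         | none => best.getD g 0) := by
  induction ref generalizing best with
  | nil => rfl
  | cons p rest ih =>
    obtain ⟨k, c⟩ := p
    simp only [List.map_cons, List.nodup_cons] at hnd
    simp only [List.foldl_cons, List.lookup_cons]
    by_cases hk : g = k
    · have hnm : g ∉ rest.map Prod.fst := hk ▸ hnd.1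
      rw [getD_innerFold_not_mem _ _ _ hnm, getD_bStep, if_pos hk, hk]
      simp
    · have hbeq : (g == k) = false := by simp [hk]
      rw [ih _ hnd.2, getD_bStep, if_neg hk]
      simp [hbeq]

-- B's whole precomputation, pointwise = A's inner loop over the references
lemma getD_bestFold (refs : List (List (String × Int))) (best : PySem.Dict String Int)
    (g : String) (hnd : ∀ ref ∈ refs, (ref.map Prod.fst).Nodup) :
    (refs.foldl (fun best ref =>
      ref.foldl (fun best p =>
        if p.2 > best.getD p.1 0 then best.insert p.1 p.2 else best) best) best).getD g 0
      = refs.foldl (fun m ref =>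
          match ref.lookup g with
          | some v => max m v
          | none => m) (best.getD g 0) := by
  revert hnd
  induction refs generalizing best with
  | nil => intro _; rfl
  | cons ref rest ih =>
    intro hnd
    simp only [List.foldl_cons]
    rw [ih _ (fun r hr => hnd r (List.mem_cons_of_mem _ hr)),
        getD_innerFold _ _ _ (hnd ref (List.mem_cons_self ..))]

lemma getD_bestRefCounts (refs : List (List (String × Int))) (g : String)
    (hnd : ∀ ref ∈ refs, (ref.map Prod.fst).Nodup) :
    (bestRefCounts refs).getD g 0
      = refs.foldl (fun m ref =>
          match ref.lookup g with
          | some v => max m v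
          | none => m) 0 := by
  unfold bestRefCounts
  rw [getD_bestFold _ _ _ hnd, PySem.Dict.getD_empty]

-- ===== VERDICT (by name: the statement is the Claim_ definition above) =====
theorem clipped_count_py_spec : Claim_equal_clipped_count_py := by
  intro refs_ngram pred_ngram _ hpre
  unfold Spec_clipped_count_py clipped_count_py_alt
  have hA : clipped_count_py refs_ngram pred_ngram
      = pred_ngram.foldl (fun score p =>
          score + min (refs_ngram.foldl (fun m ref =>
            match ref.lookup p.1 with
            | some v => max m v
            | none => m) 0) p.2) 0 := rfl
  rw [hA, PySem.List.foldl_add]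
  rw [zero_add]
  congr 1
  apply List.map_congr_left
  intro p _
  rw [getD_bestRefCounts _ _ hpre.1]
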